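-- pv_equiv track=rewrite | github.com/sipsalabs/ultracompress | scripts/overlay/stream_compress.py | parse_layer_index_from_key
-- ===== SOURCE A (Python) =====
-- def parse_layer_index_from_key(key: str) -> int | None:
--     """`model.layers.27.self_attn.q_proj.weight` -> 27. None for non-layer keys."""
--     # Match `model.layers.{N}.` or `layers.{N}.`
--     parts = key.split(".")
--     for i, p in enumerate(parts):
--         if p == "layers" and i + 1 < len(parts):
--             try:
--                 return int(parts[i + 1])
--             except ValueError:
--                 return None
--     return None
-- ===== SOURCE B (Python) =====
-- def parse_layer_index_from_key(key: str) -> int | None: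
--     """`model.layers.27.self_attn.q_proj.weight` -> 27. None for non-layer keys."""
--     # Consume the key segment by segment with str.partition instead of
--     # building the full split list and scanning it with enumerate/indexing.
--     while True:
--         head, sep, key = key.partition(".")
--         if head == "layers":
--             if not sep:
--                 return None
--             try:
--                 return int(key.partition(".")[0])
--             except ValueError:
--                 return None
--         if not sep:
--             return None
-- ===== Notes on version B (the rewrite author's own statement) =====
-- stated objective: alternative
-- what changed: Replaces A's split-into-a-list plus enumerate/index scan with a while loop that consumes the key one segment at a time via str.partition, never building the parts list.
import Mathlib
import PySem

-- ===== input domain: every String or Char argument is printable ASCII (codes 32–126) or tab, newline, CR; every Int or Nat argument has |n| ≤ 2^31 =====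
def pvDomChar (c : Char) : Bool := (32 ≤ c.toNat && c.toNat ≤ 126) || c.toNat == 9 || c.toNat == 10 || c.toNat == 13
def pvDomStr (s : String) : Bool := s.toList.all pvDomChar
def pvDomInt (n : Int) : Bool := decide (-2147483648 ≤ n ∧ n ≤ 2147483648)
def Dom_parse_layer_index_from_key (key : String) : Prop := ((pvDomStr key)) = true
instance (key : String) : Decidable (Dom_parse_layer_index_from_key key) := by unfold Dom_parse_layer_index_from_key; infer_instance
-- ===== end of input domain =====

-- B replaces A's split-into-list-then-enumerate scan by a segment-at-a-time
-- str.partition consumption of the key (alternative decomposition, same cost).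

-- ===== PORT A =====
-- the for-loop over enumerate(parts) with early return
def pliLoopA (parts : List (List Char)) : List (Int × List Char) → Option Int
  | [] => none
  | (i, p) :: rest =>
    if p = "layers".toList ∧ i + 1 < (parts.length : Int) then
      -- parts[i + 1]; the guard puts the index in range, so the none case is unreachable
      match PySem.List.pyGet? parts (i + 1) with
      | some nxt => PySem.Int.ofChars? nxt   -- int(...) with 'except ValueError: return None'
      | none => none
    else pliLoopA parts rest

def parse_layer_index_from_key (key : String) : Option Int :=
  let parts := PySem.Chars.splitOn key.toList ['.']
  pliLoopA parts (PySem.List.enumerate parts 0)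

-- ===== PORT B =====
-- Source B's while-loop over key.partition("."). partition with the one-char separator "."
-- is ported exactly by hand: head = the chars before the first '.' (takeWhile), and
-- `cs.drop head.length` is [] iff the separator was absent (sep == ""), otherwise it is
-- the '.' followed by the remainder that partition returns as its third component.
def pliLoopB (cs : List Char) : Option Int :=
  match hrest : cs.drop (cs.takeWhile (· ≠ '.')).length with
  | [] => none          -- sep == "": both `return None` exits of the loop body
  | _ :: tail =>
    if cs.takeWhile (· ≠ '.') = "layers".toList then
      PySem.Int.ofChars? (tail.takeWhile (· ≠ '.'))   -- int(key.partition(".")[0]) / None on ValueError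
    else
      pliLoopB tail
termination_by cs.length
decreasing_by
  have h := congrArg List.length hrest
  simp [List.length_drop] at h
  omega

def parse_layer_index_from_key_alt (key : String) : Option Int :=
  pliLoopB key.toList

-- ===== PRECONDITION & SPEC =====
def Spec_parse_layer_index_from_key (key : String) (out : Option Int) : Prop := out = parse_layer_index_from_key_alt key
instance (key : String) (out : Option Int) : Decidable (Spec_parse_layer_index_from_key key out) := by unfold Spec_parse_layer_index_from_key; infer_instance

-- ===== CLAIM (what is proved, stated in full; the proofs are below) =====
def Claim_equal_parse_layer_index_from_key : Prop := ∀ (key : String), Dom_parse_layer_index_from_key key → Spec_parse_layer_index_from_key key (parse_layer_index_from_key key)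

-- ===== LEMMAS AND PROOFS =====

-- a structural reformulation of splitOn with the one-char separator '.'
def mySplit : List Char → List (List Char)
  | [] => [[]]
  | c :: t => if c = '.' then [] :: mySplit t else (mySplit t).modifyHead (c :: ·)

theorem mySplit_ne_nil (cs : List Char) : mySplit cs ≠ [] := by
  cases cs with
  | nil => simp [mySplit]
  | cons c t =>
    simp only [mySplit]
    split
    · simp
    · cases h : mySplit t with
      | nil => exact absurd h (mySplit_ne_nil t)
      | cons a b => simp [List.modifyHead]

theorem go_eq_mySplit : ∀ (fuel : Nat) (l cur : List Char) (acc : List (List Char)),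
    l.length ≤ fuel →
    PySem.Chars.splitOn.go ['.'] fuel l cur acc
      = acc.reverse ++ (mySplit l).modifyHead (cur.reverse ++ ·) := by
  intro fuel
  induction fuel with
  | zero =>
    intro l cur acc h
    have : l = [] := List.length_eq_zero_iff.mp (Nat.le_zero.mp h)
    subst this
    simp [PySem.Chars.splitOn.go, mySplit, List.modifyHead]
  | succ n ih =>
    intro l cur acc h
    cases l with
    | nil => simp [PySem.Chars.splitOn.go, mySplit, List.modifyHead]
    | cons c rest =>
      by_cases hc : c = '.'
      · subst hc
        have hpre : List.isPrefixOf ['.'] ('.' :: rest) = true := by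
          simp [List.isPrefixOf]
        simp only [PySem.Chars.splitOn.go, hpre, if_pos]
        have hdrop : List.drop (['.'] : List Char).length ('.' :: rest) = rest := rfl
        rw [hdrop, ih rest [] ((cur.reverse) :: acc) (by simpa using Nat.le_of_succ_le_succ h)]
        simp only [mySplit, List.modifyHead, List.reverse_cons, List.append_assoc,
          List.nil_append, List.cons_append]
        cases mySplit rest <;> simp
      · have hpre : List.isPrefixOf ['.'] (c :: rest) = false := by
          simp [List.isPrefixOf]
          exact fun h' => hc h'.symm
        simp only [PySem.Chars.splitOn.go, hpre]
        rw [if_neg (by simp)]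
        rw [ih rest (c :: cur) acc (by simpa using Nat.le_of_succ_le_succ h)]
        simp only [mySplit, if_neg hc]
        cases hms : mySplit rest with
        | nil => exact absurd hms (mySplit_ne_nil rest)
        | cons a b => simp [List.modifyHead]

theorem splitOn_dot_eq_mySplit (cs : List Char) :
    PySem.Chars.splitOn cs ['.'] = mySplit cs := by
  unfold PySem.Chars.splitOn
  rw [go_eq_mySplit (cs.length + 1) cs [] [] (by omega)]
  cases h : mySplit cs with
  | nil => exact absurd h (mySplit_ne_nil cs)
  | cons a b => simp [List.modifyHead]

-- the partition structure of mySplit: head segment, then recursion past the first '.'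
theorem mySplit_eq_head_cons (cs : List Char) :
    mySplit cs = cs.takeWhile (· ≠ '.') ::
      (match cs.drop (cs.takeWhile (· ≠ '.')).length with
       | [] => []
       | _ :: t => mySplit t) := by
  induction cs with
  | nil => simp [mySplit]
  | cons c t ih =>
    by_cases hc : c = '.'
    · subst hc
      simp [mySplit, List.takeWhile]
    · have htw : List.takeWhile (fun x => decide (x ≠ '.')) (c :: t)
          = c :: List.takeWhile (fun x => decide (x ≠ '.')) t := by
        rw [List.takeWhile_cons, if_pos (by simpa using hc)]
      simp only [mySplit, if_neg hc]
      rw [ih]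
      show _ = (List.takeWhile (fun x => decide (x ≠ '.')) (c :: t)) :: _
      rw [htw]
      simp only [List.modifyHead, List.length_cons, List.drop_succ_cons]

-- A's scan restated as a paired recursion on the parts list (no indices)
def simpleScan : List (List Char) → Option Int
  | [] => none
  | [_] => none
  | p :: q :: rest =>
    if p = "layers".toList then PySem.Int.ofChars? q else simpleScan (q :: rest)

theorem loopA_eq_simpleScan (suf : List (List Char)) : ∀ (k : Nat) (parts : List (List Char)),
    parts.drop k = suf → pliLoopA parts (PySem.List.enumerate suf (k : Int)) = simpleScan suf := by
  induction suf with
  | nil => intro k parts _; simp [PySem.List.enumerate_nil, pliLoopA, simpleScan]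
  | cons p rest ih =>
    intro k parts hdrop
    have hk : k ≤ parts.length := by
      by_contra hgt
      rw [List.drop_eq_nil_of_le (by omega)] at hdrop
      exact (List.cons_ne_nil _ _) hdrop.symm
    have hlen : parts.length = k + 1 + rest.length := by
      have := congrArg List.length hdrop
      simp [List.length_drop] at this
      omega
    rw [PySem.List.enumerate_cons]
    simp only [pliLoopA]
    by_cases hp : p = "layers".toList
    · cases rest with
      | nil =>
        have hlen' : parts.length = k + 1 := by simpa using hlen
        rw [if_neg (by rintro ⟨-, hlt⟩; rw [hlen'] at hlt; push_cast at hlt; omega)]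
        simp [PySem.List.enumerate_nil, pliLoopA, simpleScan]
      | cons q rest' =>
        rw [if_pos ⟨hp, by rw [hlen]; push_cast [List.length_cons]; omega⟩]
        have hget : PySem.List.pyGet? parts ((k : Int) + 1) = some q := by
          have h1 : ((k : Int) + 1) = ((k + 1 : Nat) : Int) := by push_cast; ring
          rw [h1, PySem.List.pyGet?_natCast]
          have h2 : parts[k + 1]? = (parts.drop k)[1]? := by rw [List.getElem?_drop]
          rw [h2, hdrop]
          simp
        rw [hget]
        simp [simpleScan, hp]
    · rw [if_neg (fun hcon => hp hcon.1)]
      have hdrop' : parts.drop (k + 1) = rest := by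
        rw [← List.drop_drop, hdrop]; simp
      have h1 : (k : Int) + 1 = ((k + 1 : Nat) : Int) := by push_cast; ring
      rw [h1, ih (k + 1) parts hdrop']
      cases rest with
      | nil => simp [simpleScan]
      | cons q rest' => simp only [simpleScan]; rw [if_neg hp]

theorem loopB_eq_simpleScan (cs : List Char) :
    pliLoopB cs = simpleScan (mySplit cs) := by
  rw [mySplit_eq_head_cons cs, pliLoopB]
  split
  next hrest =>
    rw [hrest]
    simp [simpleScan]
  next x tail hrest =>
    rw [hrest]
    have htail : tail.length < cs.length := by
      have h := congrArg List.length hrest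
      simp [List.length_drop] at h
      omega
    have hred : (match x :: tail with | [] => ([] : List (List Char)) | _ :: t => mySplit t)
        = mySplit tail := rfl
    rw [hred]
    cases hms : mySplit tail with
    | nil => exact absurd hms (mySplit_ne_nil tail)
    | cons q m' =>
      have hq : q = tail.takeWhile (· ≠ '.') := by
        have hstruct := mySplit_eq_head_cons tail
        rw [hms] at hstruct
        exact (List.cons_eq_cons.mp hstruct).1
      simp only [simpleScan]
      by_cases hh : cs.takeWhile (· ≠ '.') = "layers".toList
      · rw [if_pos hh, if_pos hh, hq]
      · rw [if_neg hh, if_neg hh, ← hms, loopB_eq_simpleScan tail]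
termination_by cs.length

-- ===== VERDICT (by name: the statement is the Claim_ definition above) =====
theorem parse_layer_index_from_key_spec : Claim_equal_parse_layer_index_from_key := by
  intro key _
  unfold Spec_parse_layer_index_from_key parse_layer_index_from_key parse_layer_index_from_key_alt
  rw [splitOn_dot_eq_mySplit, loopB_eq_simpleScan]
  have h0 : ((0 : Nat) : Int) = 0 := rfl
  rw [← h0, loopA_eq_simpleScan (mySplit key.toList) 0 (mySplit key.toList) (by simp)]
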